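-- pv_equiv track=rewrite | github.com/2739673455/address-alignment | address_alignment_new.py | address_extract
-- ===== SOURCE A (Python) =====
-- def address_extract(text: str, tagging: list[str]) -> dict[int, str]:
--     # 标签到地区类别 id 映射表
--     label_map = {
--         "": 0,
--         "prov": 2,
--         "city": 3,
--         "district": 4,
--         "road": 5,
--         "intersection": 5,
--         "town": 5,
--         "roadno": 6,
--         "cellno": 6,
--         "community": 6,
--         "houseno": 6,
--         "poi": 6,
--         "subpoi": 6,
--         "assist": 6,
--         "distance": 6,
--         "village_group": 6,
--         "floorno": 6,
--         "devzone": 6,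
--     }
--     # 各级别对应地址信息
--     address = {2: None, 3: None, 4: None, 5: None, 6: None}
--     # 提取出各级别地址信息
--     start_pos = 0
--     tag_len = len(tagging)
--     for end_pos in range(tag_len):
--         # 如果到结尾、或 end_pos 的下一个位置不是同一类
--         if (end_pos == tag_len - 1) or (
--             label_map[tagging[end_pos + 1]] != label_map[tagging[start_pos]]
--         ):
--             if label_map[tagging[start_pos]] != 0:
--                 # 添加片段
--                 address[label_map[tagging[start_pos]]] = text[start_pos : end_pos + 1]
--             start_pos = end_pos + 1
--     return address
-- ===== SOURCE B (Python) =====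
-- def address_extract(text: str, tagging: list[str]) -> dict[int, str]:
--     label_map = {
--         "": 0, "prov": 2, "city": 3, "district": 4,
--         "road": 5, "intersection": 5, "town": 5,
--         "roadno": 6, "cellno": 6, "community": 6, "houseno": 6,
--         "poi": 6, "subpoi": 6, "assist": 6, "distance": 6,
--         "village_group": 6, "floorno": 6, "devzone": 6,
--     }
--     # phase 1: map every tag to its category once
--     cats = [label_map[t] for t in tagging]
--     # phase 2: for each category independently, search BACKWARDS for its last
--     # occurrence, then extend left to the start of that maximal run and slice it.
--     # Correct because the forward segmentation keeps, per category, exactly the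
--     # slice of the last maximal run of that category (later runs overwrite).
--     address = {}
--     for c in (2, 3, 4, 5, 6):
--         seg = None
--         j = len(cats) - 1
--         while j >= 0 and cats[j] != c:
--             j -= 1
--         if j >= 0:
--             i = j
--             while i > 0 and cats[i - 1] == c:
--                 i -= 1
--             seg = text[i:j + 1]
--         address[c] = seg
--     return address
-- ===== Notes on version B (the rewrite author's own statement) =====
-- stated objective: alternative
-- what changed: B never segments the tag sequence at all: after mapping tags to categories once, it searches, for each of the five categories independently, backwards from the end for its last occurrence, extends left to that run's start and slices it -- exploiting that A's forward run-splitting keeps exactly the last run per category; A instead makes one forward pass over indices maintaining a start pointer.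
import Mathlib
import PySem

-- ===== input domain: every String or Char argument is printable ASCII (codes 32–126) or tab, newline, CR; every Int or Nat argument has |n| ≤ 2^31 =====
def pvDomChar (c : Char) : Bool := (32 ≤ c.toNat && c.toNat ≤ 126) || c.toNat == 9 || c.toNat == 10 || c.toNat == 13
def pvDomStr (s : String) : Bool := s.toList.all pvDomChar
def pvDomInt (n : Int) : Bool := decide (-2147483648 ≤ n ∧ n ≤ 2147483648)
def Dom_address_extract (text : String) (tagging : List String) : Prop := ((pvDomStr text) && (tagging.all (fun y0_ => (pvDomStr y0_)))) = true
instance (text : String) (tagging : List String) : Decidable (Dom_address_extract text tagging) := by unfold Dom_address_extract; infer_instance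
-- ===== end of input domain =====

-- B replaces A's forward run-splitting pass by five independent backward searches:
-- per category it finds the last occurrence, extends left to the run start and slices.
-- Objective: alternative (same O(n) cost, different algorithm).

-- ===== PORT A =====
-- the label_map dict of A (shared literal; A looks tags up one at a time)
def pvLabelMap : PySem.Dict String Int := PySem.Dict.ofList
  [("", 0), ("prov", 2), ("city", 3), ("district", 4), ("road", 5), ("intersection", 5),
   ("town", 5), ("roadno", 6), ("cellno", 6), ("community", 6), ("houseno", 6), ("poi", 6),
   ("subpoi", 6), ("assist", 6), ("distance", 6), ("village_group", 6), ("floorno", 6),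
   ("devzone", 6)]

-- label_map[t]; Python raises KeyError when t is not a key — Pre_ excludes those inputs
def pvLm (t : String) : Int := (pvLabelMap.get? t).getD 0

def pvInitAddr : PySem.Dict Int (Option String) :=
  PySem.Dict.ofList [(2, none), (3, none), (4, none), (5, none), (6, none)]

-- one iteration of A's for-loop; state = (address, start_pos)
def pvStepA (text : String) (tagging : List String) (tagLen : Nat)
    (st : PySem.Dict Int (Option String) × Nat) (endPos : Nat) :
    PySem.Dict Int (Option String) × Nat :=
  if endPos = tagLen - 1 ∨ pvLm (tagging.getD (endPos + 1) "") ≠ pvLm (tagging.getD st.2 "") then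
    let addr :=
      if pvLm (tagging.getD st.2 "") ≠ 0 then
        st.1.insert (pvLm (tagging.getD st.2 ""))
          (some (PySem.Str.slice text (some (st.2 : Int)) (some ((endPos : Int) + 1))))
      else st.1
    (addr, endPos + 1)
  else st

def address_extract (text : String) (tagging : List String) : List (Int × Option String) :=
  ((List.range tagging.length).foldl (pvStepA text tagging tagging.length) (pvInitAddr, 0)).1.items

-- ===== PORT B =====
-- B's first while loop: j walks down from fuel-1 until cats[j] = c (none if it hits -1)
def pvFindLast (cats : List Int) (c : Int) : Nat → Option Nat
  | 0 => none
  | j + 1 => if cats.getD j 0 = c then some j else pvFindLast cats c j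

-- B's second while loop: extend left from index i while the previous entry is still c
def pvRunStart (cats : List Int) (c : Int) : Nat → Nat
  | 0 => 0
  | i + 1 => if cats.getD i 0 = c then pvRunStart cats c i else i + 1

-- seg for one category: last occurrence, run start, slice (None when c never occurs)
def pvSeg (text : String) (cats : List Int) (c : Int) : Option String :=
  match pvFindLast cats c cats.length with
  | none => none
  | some j => some (PySem.Str.slice text (some ((pvRunStart cats c j : Nat) : Int))
      (some (((j : Nat) : Int) + 1)))

def address_extract_alt (text : String) (tagging : List String) : List (Int × Option String) :=
  (([2, 3, 4, 5, 6] : List Int).foldl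
    (fun d c => d.insert c (pvSeg text (tagging.map pvLm) c)) PySem.Dict.empty).items

-- ===== PRECONDITION & SPEC =====
-- Python A raises KeyError exactly when some tag is not a key of label_map; Pre_ excludes those inputs.
def Pre_address_extract (_text : String) (tagging : List String) : Prop :=
  tagging.all (fun t => t ∈ ["", "prov", "city", "district", "road", "intersection", "town",
    "roadno", "cellno", "community", "houseno", "poi", "subpoi", "assist", "distance",
    "village_group", "floorno", "devzone"]) = true
instance (text : String) (tagging : List String) : Decidable (Pre_address_extract text tagging) := by
  unfold Pre_address_extract; infer_instance

def pvWitness_address_extract : String × List String := ("abcdef", ["prov", "prov", "city", "", "poi", "poi"])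

def Spec_address_extract (text : String) (tagging : List String) (out : List (Int × Option String)) : Prop := out = address_extract_alt text tagging
instance (text : String) (tagging : List String) (out : List (Int × Option String)) : Decidable (Spec_address_extract text tagging out) := by unfold Spec_address_extract; infer_instance

-- ===== CLAIM (what is proved, stated in full; the proofs are below) =====
def Claim_equal_address_extract : Prop := ∀ (text : String) (tagging : List String), Dom_address_extract text tagging → Pre_address_extract text tagging → Spec_address_extract text tagging (address_extract text tagging)

-- ===== LEMMAS AND PROOFS =====

-- proof-only intermediate program: the run-jumping loop both ports are compared through
def pvRunEnd (cats : List Int) (c : Int) (e : Nat) : Nat :=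
  if h : e < cats.length ∧ cats.getD e 0 = c then pvRunEnd cats c (e + 1) else e
termination_by cats.length - e
decreasing_by omega

theorem pvRunEnd_ge (cats : List Int) (c : Int) (e : Nat) : e ≤ pvRunEnd cats c e := by
  induction e using pvRunEnd.induct cats c with
  | case1 e h ih => rw [pvRunEnd, dif_pos h]; omega
  | case2 e h => rw [pvRunEnd, dif_neg h]

def pvLoopB (text : String) (cats : List Int) (pos : Nat)
    (addr : PySem.Dict Int (Option String)) : PySem.Dict Int (Option String) :=
  if h : pos < cats.length then
    let c := cats.getD pos 0
    let en := pvRunEnd cats c (pos + 1)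
    let addr' :=
      if c ≠ 0 then
        addr.insert c (some (PySem.Str.slice text (some (pos : Int)) (some (en : Int))))
      else addr
    pvLoopB text cats en addr'
  else addr
termination_by cats.length - pos
decreasing_by
  have := pvRunEnd_ge cats (cats.getD pos 0) (pos + 1)
  omega

-- bridge: A's per-access lookup equals indexing the precomputed category list
theorem pvLm_getD (tagging : List String) (i : Nat) :
    pvLm (tagging.getD i "") = (tagging.map pvLm).getD i 0 := by
  simp only [List.getD, List.getElem?_map]
  cases tagging[i]? with
  | none => simp; decide
  | some t => simp

theorem pvRunEnd_le (cats : List Int) (c : Int) (e : Nat) (h : e ≤ cats.length) :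
    pvRunEnd cats c e ≤ cats.length := by
  induction e using pvRunEnd.induct cats c with
  | case1 e h' ih => rw [pvRunEnd, dif_pos h']; exact ih (by omega)
  | case2 e h' => rw [pvRunEnd, dif_neg h']; omega

theorem pvRunEnd_run (cats : List Int) (c : Int) (e : Nat) :
    ∀ j, e ≤ j → j < pvRunEnd cats c e → cats.getD j 0 = c := by
  induction e using pvRunEnd.induct cats c with
  | case1 e h' ih =>
      intro j hj1 hj2
      rw [pvRunEnd, dif_pos h'] at hj2
      rcases Nat.eq_or_lt_of_le hj1 with rfl | hlt
      · exact h'.2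
      · exact ih j hlt hj2
  | case2 e h' =>
      intro j hj1 hj2
      rw [pvRunEnd, dif_neg h'] at hj2; omega

theorem pvRunEnd_stop (cats : List Int) (c : Int) (e : Nat) :
    ¬ (pvRunEnd cats c e < cats.length ∧ cats.getD (pvRunEnd cats c e) 0 = c) := by
  induction e using pvRunEnd.induct cats c with
  | case1 e h' ih => rw [pvRunEnd, dif_pos h']; exact ih
  | case2 e h' => rw [pvRunEnd, dif_neg h']; exact h'

-- core: A's loop over one run [sp, t] fires only at t, inserting the run's slice
theorem runA (text : String) (tagging : List String) (c : Int) (sp t : Nat)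
    (ht : t < tagging.length)
    (hrun : ∀ j, sp ≤ j → j ≤ t → (tagging.map pvLm).getD j 0 = c)
    (hstop : t + 1 = tagging.length ∨ (tagging.map pvLm).getD (t + 1) 0 ≠ c) :
    ∀ k e, sp ≤ e → e ≤ t → k = t - e →
    ∀ addr, List.foldl (pvStepA text tagging tagging.length) (addr, sp) (List.range' e (t + 1 - e))
      = ((if c ≠ 0 then
            addr.insert c (some (PySem.Str.slice text (some (sp : Int)) (some ((t : Int) + 1))))
          else addr), t + 1) := by
  intro k
  induction k with
  | zero =>
      intro e he1 he2 hk addr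
      obtain rfl : e = t := by omega
      have hr : e + 1 - e = 1 := by omega
      rw [hr]
      simp only [List.range'_one, List.foldl_cons, List.foldl_nil]
      have hsp : pvLm (tagging.getD sp "") = c := by
        rw [pvLm_getD]; exact hrun sp (le_refl _) (by omega)
      have hcond : e = tagging.length - 1 ∨
          pvLm (tagging.getD (e + 1) "") ≠ pvLm (tagging.getD sp "") := by
        rcases hstop with h1 | h2
        · left; omega
        · right; rw [pvLm_getD, hsp]; exact h2
      rw [pvStepA, if_pos hcond]
      simp only [hsp]
  | succ m ih =>
      intro e he1 he2 hk addr
      have hl : e < t := by omega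
      have hr : t + 1 - e = (t - e) + 1 := by omega
      rw [hr, List.range'_succ, List.foldl_cons]
      have hsp : pvLm (tagging.getD sp "") = c := by
        rw [pvLm_getD]; exact hrun sp (le_refl _) (by omega)
      have hnext : pvLm (tagging.getD (e + 1) "") = c := by
        rw [pvLm_getD]; exact hrun (e + 1) (by omega) (by omega)
      have hcond : ¬ (e = tagging.length - 1 ∨
          pvLm (tagging.getD (e + 1) "") ≠ pvLm (tagging.getD sp "")) := by
        rintro (h1 | h2)
        · omega
        · exact h2 (by rw [hnext, hsp])
      rw [pvStepA, if_neg hcond]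
      have := ih (e + 1) (by omega) (by omega) (by omega) addr
      have hr2 : t - e = t + 1 - (e + 1) := by omega
      rw [hr2]
      exact this

-- main A-side: A's index loop from any run boundary equals the run-jumping loop
theorem mainA (text : String) (tagging : List String) :
    ∀ k i addr, k = tagging.length - i →
    (List.foldl (pvStepA text tagging tagging.length) (addr, i)
        (List.range' i (tagging.length - i))).1
      = pvLoopB text (tagging.map pvLm) i addr := by
  intro k
  induction k using Nat.strong_induction_on with
  | _ k ih =>
    intro i addr hk
    set cats := tagging.map pvLm with hcats
    have hlen : cats.length = tagging.length := by simp [hcats]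
    by_cases hi : i < tagging.length
    · set c := cats.getD i 0 with hc
      set en := pvRunEnd cats c (i + 1) with hen
      have hge : i + 1 ≤ en := pvRunEnd_ge cats c (i + 1)
      have hle : en ≤ tagging.length := by
        have := pvRunEnd_le cats c (i + 1) (by omega)
        omega
      have hstop' := pvRunEnd_stop cats c (i + 1)
      rw [← hen] at hstop'
      have hrun : ∀ j, i ≤ j → j ≤ en - 1 → cats.getD j 0 = c := by
        intro j hj1 hj2
        rcases Nat.eq_or_lt_of_le hj1 with rfl | hlt
        · rfl
        · exact pvRunEnd_run cats c (i + 1) j (by omega) (by omega)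
      have hbound : en - 1 + 1 = tagging.length ∨ cats.getD (en - 1 + 1) 0 ≠ c := by
        have h1 : en - 1 + 1 = en := by omega
        rw [h1, hlen] at *
        by_cases h2 : en = tagging.length
        · left; exact h2
        · right
          intro heq
          exact hstop' ⟨by rw [hlen]; omega, heq⟩
      have hsplit : List.range' i (tagging.length - i)
          = List.range' i (en - i) ++ List.range' en (tagging.length - en) := by
        have h := @List.range'_append i (en - i) (tagging.length - en) 1
        simp only [one_mul] at h
        rw [show i + (en - i) = en by omega] at h
        rw [show en - i + (tagging.length - en) = tagging.length - i by omega] at h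
        exact h.symm
      rw [hsplit, List.foldl_append]
      have hrA := runA text tagging c i (en - 1) (by omega) hrun hbound
        (en - 1 - i) i (le_refl _) (by omega) rfl addr
      have h1 : en - 1 + 1 = en := by omega
      rw [h1] at hrA
      have h2 : ((en - 1 : Nat) : Int) + 1 = (en : Int) := by omega
      rw [h2] at hrA
      rw [hrA]
      have hIH := ih (tagging.length - en) (by omega) en
        (if c ≠ 0 then
            addr.insert c (some (PySem.Str.slice text (some (i : Int)) (some ((en : Int)))))
          else addr) rfl
      rw [hIH]
      conv_rhs => rw [pvLoopB, dif_pos (show i < cats.length by omega)]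
    · have h0 : tagging.length - i = 0 := by omega
      rw [h0]
      simp only [List.range'_zero, List.foldl_nil]
      rw [pvLoopB, dif_neg (by omega)]

-- B-side lemmas: characterise pvFindLast / pvRunStart and relate pvLoopB to pvSeg

theorem pvGetDAux (P : Int → Prop) (t : String) (h0 : P 0) :
    ∀ l : List (String × Int), (∀ p ∈ l, P p.2) →
    P (((PySem.Dict.mk l).get? t).getD 0) := by
  intro l
  induction l with
  | nil => intro _; simpa [PySem.Dict.get?] using h0
  | cons p rest ih =>
      intro hmem
      rw [PySem.Dict.get?_mk_cons]
      split
      · exact hmem p (by simp)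
      · exact ih (fun q hq => hmem q (by simp [hq]))

theorem pvLm_cases (t : String) :
    pvLm t = 0 ∨ pvLm t = 2 ∨ pvLm t = 3 ∨ pvLm t = 4 ∨ pvLm t = 5 ∨ pvLm t = 6 := by
  have h : pvLabelMap = PySem.Dict.mk [("", 0), ("prov", 2), ("city", 3), ("district", 4),
      ("road", 5), ("intersection", 5), ("town", 5), ("roadno", 6), ("cellno", 6),
      ("community", 6), ("houseno", 6), ("poi", 6), ("subpoi", 6), ("assist", 6),
      ("distance", 6), ("village_group", 6), ("floorno", 6), ("devzone", 6)] := by decide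
  unfold pvLm
  rw [h]
  exact pvGetDAux (fun x => x = 0 ∨ x = 2 ∨ x = 3 ∨ x = 4 ∨ x = 5 ∨ x = 6) t (by decide) _ (by decide)

theorem pvFindLast_some (cats : List Int) (c : Int) (f j : Nat)
    (h : pvFindLast cats c f = some j) :
    j < f ∧ cats.getD j 0 = c ∧ ∀ j', j < j' → j' < f → cats.getD j' 0 ≠ c := by
  induction f with
  | zero => simp [pvFindLast] at h
  | succ f ih =>
      rw [pvFindLast] at h
      split at h
      · cases h
        refine ⟨by omega, by assumption, ?_⟩
        intro j' h1 h2; omega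
      · obtain ⟨h1, h2, h3⟩ := ih h
        refine ⟨by omega, h2, ?_⟩
        intro j' hj1 hj2
        rcases Nat.lt_succ_iff_lt_or_eq.mp hj2 with h' | rfl
        · exact h3 j' hj1 h'
        · assumption
      
theorem pvFindLast_none (cats : List Int) (c : Int) (f : Nat)
    (h : pvFindLast cats c f = none) : ∀ j, j < f → cats.getD j 0 ≠ c := by
  induction f with
  | zero => intro j hj; omega
  | succ f ih =>
      rw [pvFindLast] at h
      split at h
      · cases h
      · intro j hj
        rcases Nat.lt_succ_iff_lt_or_eq.mp hj with h' | rfl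
        · exact ih h j h'
        · assumption

theorem pvRunStart_eq (cats : List Int) (c : Int) (pos : Nat) :
    ∀ j, pos ≤ j → (∀ m, pos ≤ m → m ≤ j → cats.getD m 0 = c) →
    (pos = 0 ∨ cats.getD (pos - 1) 0 ≠ c) → pvRunStart cats c j = pos := by
  intro j
  induction j with
  | zero =>
      intro h1 _ _
      obtain rfl : pos = 0 := by omega
      rfl
  | succ i ih =>
      intro h1 hall hb
      rw [pvRunStart]
      rcases Nat.eq_or_lt_of_le h1 with rfl | hlt
      · -- j = pos = i+1; previous entry is not c
        rcases hb with h | h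
        · omega
        · rw [if_neg (by simpa using h)]
      · -- pos ≤ i: previous entry is c, recurse
        rw [if_pos (hall i (by omega) (by omega))]
        exact ih (by omega) (fun m hm1 hm2 => hall m hm1 (by omega)) hb

-- invariant of the run-jumping loop against B's per-category backward search
theorem loopB_get (text : String) (cats : List Int) :
    ∀ k pos addr, k = cats.length - pos →
    (pos = 0 ∨ cats.length ≤ pos ∨ cats.getD (pos - 1) 0 ≠ cats.getD pos 0) →
    ∀ c : Int, c ≠ 0 →
    (pvLoopB text cats pos addr).get? c =
      match pvFindLast cats c cats.length with
      | some j => if pos ≤ j then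
          some (some (PySem.Str.slice text (some ((pvRunStart cats c j : Nat) : Int))
            (some (((j : Nat) : Int) + 1))))
        else addr.get? c
      | none => addr.get? c := by
  intro k
  induction k using Nat.strong_induction_on with
  | _ k ih =>
    intro pos addr hk hB c hc
    by_cases hpos : pos < cats.length
    · set c0 := cats.getD pos 0 with hc0
      set en := pvRunEnd cats c0 (pos + 1) with hen
      have hge : pos + 1 ≤ en := pvRunEnd_ge cats c0 (pos + 1)
      have hle : en ≤ cats.length := pvRunEnd_le cats c0 (pos + 1) (by omega)
      have hstop := pvRunEnd_stop cats c0 (pos + 1)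
      rw [← hen] at hstop
      have hrun : ∀ m, pos ≤ m → m < en → cats.getD m 0 = c0 := by
        intro m h1 h2
        rcases Nat.eq_or_lt_of_le h1 with rfl | h
        · rfl
        · exact pvRunEnd_run cats c0 (pos + 1) m h h2
      set addr' := if c0 ≠ 0 then
          addr.insert c0 (some (PySem.Str.slice text (some (pos : Int)) (some (en : Int))))
        else addr with haddr'
      have hloop : pvLoopB text cats pos addr = pvLoopB text cats en addr' := by
        conv_lhs => rw [pvLoopB, dif_pos hpos]
      have hB' : en = 0 ∨ cats.length ≤ en ∨ cats.getD (en - 1) 0 ≠ cats.getD en 0 := by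
        by_cases h : en < cats.length
        · right; right
          rw [hrun (en - 1) (by omega) (by omega)]
          intro heq
          exact hstop ⟨h, heq.symm⟩
        · right; left; omega
      have hIH := ih (cats.length - en) (by omega) en addr' rfl hB' c hc
      rw [hloop, hIH]
      -- relate the match at en/addr' to the match at pos/addr
      by_cases hcc : c = c0
      · -- c is this run's category; c0 ≠ 0 since c ≠ 0
        subst hcc
        have haddr'' : addr' = addr.insert c0
            (some (PySem.Str.slice text (some (pos : Int)) (some (en : Int)))) := by
          rw [haddr', if_pos hc]
        cases hfl : pvFindLast cats c0 cats.length with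
        | none =>
            exact absurd (hrun pos (le_refl _) (by omega))
              (pvFindLast_none cats c0 cats.length hfl pos hpos)
        | some j =>
            obtain ⟨hj1, hj2, hj3⟩ := pvFindLast_some cats c0 cats.length j hfl
            simp only
            by_cases hej : en ≤ j
            · rw [if_pos hej, if_pos (by omega)]
            · -- j < en: j must be en - 1, value comes from the insert
              have hj : j = en - 1 := by
                by_cases h' : j < pos
                · exact absurd (hrun (en - 1) (by omega) (by omega))
                    (hj3 (en - 1) (by omega) (by omega))
                · by_cases h'' : j = en - 1
                  · exact h''
                  · exact absurd (hrun (en - 1) (by omega) (by omega))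
                      (hj3 (en - 1) (by omega) (by omega))
              subst hj
              rw [if_neg (by omega), if_pos (by omega)]
              rw [haddr'', PySem.Dict.get?_insert_self]
              have hrs : pvRunStart cats c0 (en - 1) = pos :=
                pvRunStart_eq cats c0 pos (en - 1) (by omega)
                  (fun m h1 h2 => hrun m h1 (by omega))
                  (by rcases hB with h | h | h
                      · left; exact h
                      · omega
                      · right; rw [← hrun pos (le_refl _) (by omega)] at h; exact h)
              rw [hrs]
              have : ((en - 1 : Nat) : Int) + 1 = (en : Int) := by omega
              rw [this]
      · -- c is another category: the insert (if any) does not touch it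
        have haddrc : addr'.get? c = addr.get? c := by
          rw [haddr']
          split
          · exact PySem.Dict.get?_insert_of_ne _ _ hcc
          · rfl
        cases hfl : pvFindLast cats c cats.length with
        | none => simp only [haddrc]
        | some j =>
            obtain ⟨hj1, hj2, hj3⟩ := pvFindLast_some cats c cats.length j hfl
            simp only
            have hnotin : ¬ (pos ≤ j ∧ j < en) := by
              rintro ⟨h1, h2⟩
              exact hcc (by rw [← hj2, hrun j h1 h2])
            by_cases hej : en ≤ j
            · rw [if_pos hej, if_pos (by omega)]
            · rw [if_neg hej, if_neg (by omega), haddrc]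
    · -- pos ≥ length: loop returns addr; match always hits the addr branch
      rw [pvLoopB, dif_neg hpos]
      cases hfl : pvFindLast cats c cats.length with
      | none => rfl
      | some j =>
          obtain ⟨hj1, _, _⟩ := pvFindLast_some cats c cats.length j hfl
          simp only
          rw [if_neg (by omega)]

-- keys of the run-jumping loop stay [2,3,4,5,6]
theorem loopB_keys (text : String) (cats : List Int)
    (hvals : ∀ x ∈ cats, x = 0 ∨ x ∈ ([2, 3, 4, 5, 6] : List Int)) :
    ∀ k pos addr, k = cats.length - pos → addr.keys = [2, 3, 4, 5, 6] →
    (pvLoopB text cats pos addr).keys = [2, 3, 4, 5, 6] := by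
  intro k
  induction k using Nat.strong_induction_on with
  | _ k ih
  intro pos addr hk hkeys
  by_cases hpos : pos < cats.length
  · rw [pvLoopB, dif_pos hpos]
    set c0 := cats.getD pos 0 with hc0
    have hge := pvRunEnd_ge cats c0 (pos + 1)
    apply ih (cats.length - pvRunEnd cats c0 (pos + 1)) (by omega) _ _ rfl
    split
    · have hmem : c0 ∈ cats := by
        have : cats.getD pos 0 = cats[pos] := List.getD_eq_getElem cats 0 hpos
        rw [hc0, this]; exact List.getElem_mem hpos
      have : c0 ∈ ([2, 3, 4, 5, 6] : List Int) := by
        rcases hvals c0 hmem with h | h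
        · exact absurd h (by assumption)
        · exact h
      rw [PySem.Dict.keys_insert_of_contains, hkeys]
      rw [PySem.Dict.contains_iff_mem_keys, hkeys]
      exact this
    · exact hkeys
  · rw [pvLoopB, dif_neg hpos]; exact hkeys

-- B's five-insert fold from the empty dict, spelt out as an items list
theorem altItems (text : String) (tagging : List String) :
    address_extract_alt text tagging =
      ([2, 3, 4, 5, 6] : List Int).map
        (fun c => (c, pvSeg text (tagging.map pvLm) c)) := by
  unfold address_extract_alt
  rfl

-- ===== VERDICT (by name: the statement is the Claim_ definition above) =====
theorem address_extract_spec : Claim_equal_address_extract := by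
  intro text tagging _ _
  unfold Spec_address_extract address_extract
  rw [List.range_eq_range']
  have hA := mainA text tagging (tagging.length - 0) 0 pvInitAddr rfl
  simp only [Nat.sub_zero] at hA
  rw [hA, altItems]
  set cats := tagging.map pvLm with hcats
  have hvals : ∀ x ∈ cats, x = 0 ∨ x ∈ ([2, 3, 4, 5, 6] : List Int) := by
    intro x hx
    rw [hcats, List.mem_map] at hx
    obtain ⟨t, _, rfl⟩ := hx
    rcases pvLm_cases t with h | h | h | h | h | h <;> simp [h]
  have hkeys : (pvLoopB text cats 0 pvInitAddr).keys = [2, 3, 4, 5, 6] :=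
    loopB_keys text cats hvals (cats.length - 0) 0 pvInitAddr rfl (by decide)
  have hitems := PySem.Dict.items_eq_map_keys (pvLoopB text cats 0 pvInitAddr)
    (by rw [hkeys]; decide) none
  rw [hitems, hkeys]
  apply List.map_congr_left
  intro c hcmem
  have hc : c ≠ 0 := by
    fin_cases hcmem <;> decide
  have hget := loopB_get text cats (cats.length - 0) 0 pvInitAddr rfl (by left; rfl) c hc
  have hinit : pvInitAddr.get? c = some none := by
    fin_cases hcmem <;> decide
  rw [PySem.Dict.getD_eq_get?_getD, hget]
  unfold pvSeg
  cases hfl : pvFindLast cats c cats.length with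
  | none => rw [hinit]; rfl
  | some j =>
      obtain ⟨hj1, _, _⟩ := pvFindLast_some cats c cats.length j hfl
      simp only
      rw [if_pos (by omega)]
      rfl
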